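-- pv_equiv track=rewrite | github.com/KostadinDev/graph-coloring | dfsb.py | sorted_colors
-- ===== SOURCE A (Python) =====
-- def sorted_colors(graph, graph_coloring, colors, node):
--     neighbor_colors = dict.fromkeys(colors, 0)
--     neighbors = graph[node]
--
--     for neighbor in neighbors:
--         if graph_coloring[neighbor] is not None:
--             neighbor_colors[graph_coloring[neighbor]] += 1
--
--     sorted_neighbor_colors = sorted(neighbor_colors, key=neighbor_colors.get, reverse=True)
--     return sorted_neighbor_colors
-- ===== SOURCE B (Python) =====
-- def sorted_colors(graph, graph_coloring, colors, node):
--     neighbors = graph[node]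
--
--     # first-occurrence color order and a zeroed usage counter
--     count = {}
--     order = []
--     for c in colors:
--         if c not in count:
--             count[c] = 0
--             order.append(c)
--
--     for neighbor in neighbors:
--         c = graph_coloring[neighbor]
--         if c is not None:
--             count[c] += 1
--
--     # counting sort: bucket colors by usage, emit high frequency first
--     buckets = [[] for _ in range(len(neighbors) + 1)]
--     for c in order:
--         buckets[count[c]].append(c)
--
--     result = []
--     for bucket in reversed(buckets):
--         result.extend(bucket)
--     return result
-- ===== Notes on version B (the rewrite author's own statement) =====
-- stated objective: alternative
-- what changed: Replaces the comparison-based stable reverse sort of the color-usage dict with a counting sort: colors are appended in original order to buckets indexed by their neighbor-usage count and the buckets are concatenated from highest count down.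
import Mathlib
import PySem

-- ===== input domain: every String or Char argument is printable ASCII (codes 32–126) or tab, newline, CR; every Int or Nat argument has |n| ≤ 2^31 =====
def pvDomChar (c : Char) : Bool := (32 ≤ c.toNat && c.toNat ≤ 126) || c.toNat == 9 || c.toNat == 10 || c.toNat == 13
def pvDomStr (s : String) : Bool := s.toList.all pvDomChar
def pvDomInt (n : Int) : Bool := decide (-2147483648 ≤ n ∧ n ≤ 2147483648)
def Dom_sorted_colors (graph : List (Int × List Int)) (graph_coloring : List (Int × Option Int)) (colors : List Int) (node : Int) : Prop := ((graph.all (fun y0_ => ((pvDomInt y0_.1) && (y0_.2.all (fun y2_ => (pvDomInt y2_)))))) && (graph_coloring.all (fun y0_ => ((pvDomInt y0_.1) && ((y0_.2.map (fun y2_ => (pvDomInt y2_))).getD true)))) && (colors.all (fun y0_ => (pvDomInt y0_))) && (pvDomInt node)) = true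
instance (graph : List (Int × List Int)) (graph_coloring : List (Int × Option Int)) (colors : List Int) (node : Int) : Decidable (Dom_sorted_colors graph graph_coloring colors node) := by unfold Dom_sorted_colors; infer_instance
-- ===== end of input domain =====

-- B replaces the comparison-based stable reverse sort of the color-usage dict
-- with a counting sort over buckets indexed by usage count (objective: alternative).

-- ===== PORT A =====
def sorted_colors (graph : List (Int × List Int)) (graph_coloring : List (Int × Option Int)) (colors : List Int) (node : Int) : List Int :=
  -- neighbor_colors = dict.fromkeys(colors, 0)
  let neighbor_colors : PySem.Dict Int Int :=
    colors.foldl (fun d c => d.insert c 0) PySem.Dict.empty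
  -- neighbors = graph[node]   (KeyError when node is no key: excluded by Pre_)
  let neighbors : List Int := PySem.Dict.getD (PySem.Dict.mk graph) node []
  -- for neighbor in neighbors: if graph_coloring[neighbor] is not None: neighbor_colors[...] += 1
  let nc : PySem.Dict Int Int :=
    neighbors.foldl (fun d neighbor =>
      match PySem.Dict.getD (PySem.Dict.mk graph_coloring) neighbor none with
      | some c => d.modify c 0 (· + 1)
      | none => d) neighbor_colors
  -- sorted(neighbor_colors, key=neighbor_colors.get, reverse=True)
  PySem.List.sorted nc.keys (fun c => nc.getD c 0) true

-- ===== PORT B =====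
def sorted_colors_alt (graph : List (Int × List Int)) (graph_coloring : List (Int × Option Int)) (colors : List Int) (node : Int) : List Int :=
  -- neighbors = graph[node]
  let neighbors : List Int := PySem.Dict.getD (PySem.Dict.mk graph) node []
  -- count = {}; order = []; for c in colors: if c not in count: count[c] = 0; order.append(c)
  let co : PySem.Dict Int Int × List Int :=
    colors.foldl (fun p c =>
      if p.1.contains c then p else (p.1.insert c 0, p.2 ++ [c])) (PySem.Dict.empty, [])
  -- for neighbor in neighbors: c = graph_coloring[neighbor]; if c is not None: count[c] += 1
  let count : PySem.Dict Int Int :=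
    neighbors.foldl (fun d neighbor =>
      match PySem.Dict.getD (PySem.Dict.mk graph_coloring) neighbor none with
      | some c => d.modify c 0 (· + 1)
      | none => d) co.1
  -- buckets = [[] for _ in range(len(neighbors) + 1)]
  let buckets0 : List (List Int) :=
    (PySem.List.pyRange 0 (PySem.List.len neighbors + 1) 1).map (fun _ => [])
  -- for c in order: buckets[count[c]].append(c)
  let buckets : List (List Int) :=
    co.2.foldl (fun bs c =>
      PySem.List.pySetD bs (count.getD c 0)
        (PySem.List.pyGetD bs (count.getD c 0) [] ++ [c])) buckets0
  -- result = []; for bucket in reversed(buckets): result.extend(bucket)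
  buckets.reverse.foldl (fun acc b => acc ++ b) []

-- ===== PRECONDITION & SPEC =====
-- Pre_ excludes exactly the inputs where the Python raises KeyError: node not a key of
-- graph, a neighbor not a key of graph_coloring, or a neighbor's color not in colors.
def Pre_sorted_colors (graph : List (Int × List Int)) (graph_coloring : List (Int × Option Int)) (colors : List Int) (node : Int) : Prop :=
  (PySem.Dict.mk graph).contains node = true ∧
  ∀ n ∈ PySem.Dict.getD (PySem.Dict.mk graph) node [],
    (PySem.Dict.mk graph_coloring).contains n = true ∧
    (PySem.Dict.getD (PySem.Dict.mk graph_coloring) n none).all (fun c => colors.contains c) = true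

instance (graph : List (Int × List Int)) (graph_coloring : List (Int × Option Int)) (colors : List Int) (node : Int) : Decidable (Pre_sorted_colors graph graph_coloring colors node) := by unfold Pre_sorted_colors; infer_instance

def pvWitness_sorted_colors : (List (Int × List Int)) × (List (Int × Option Int)) × List Int × Int :=
  ([(0, [1])], [(1, some 5)], [5, 3], 0)

def Spec_sorted_colors (graph : List (Int × List Int)) (graph_coloring : List (Int × Option Int)) (colors : List Int) (node : Int) (out : List Int) : Prop := out = sorted_colors_alt graph graph_coloring colors node
instance (graph : List (Int × List Int)) (graph_coloring : List (Int × Option Int)) (colors : List Int) (node : Int) (out : List Int) : Decidable (Spec_sorted_colors graph graph_coloring colors node out) := by unfold Spec_sorted_colors; infer_instance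

-- ===== CLAIM (what is proved, stated in full; the proofs are below) =====
def Claim_equal_sorted_colors : Prop := ∀ (graph : List (Int × List Int)) (graph_coloring : List (Int × Option Int)) (colors : List Int) (node : Int), Dom_sorted_colors graph graph_coloring colors node → Pre_sorted_colors graph graph_coloring colors node → Spec_sorted_colors graph graph_coloring colors node (sorted_colors graph graph_coloring colors node)

-- ===== LEMMAS AND PROOFS =====

-- a dict mapping each key of ks to 0, in order (the shape of dict.fromkeys(colors, 0))
def mkZero (ks : List Int) : PySem.Dict Int Int := PySem.Dict.mk (ks.map (fun k => (k, (0 : Int))))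

theorem keys_mkZero (ks : List Int) : (mkZero ks).keys = ks := by
  unfold mkZero PySem.Dict.keys
  simp only [List.map_map]
  exact (List.map_congr_left fun a _ => rfl).trans (List.map_id _)

theorem getD_mkZero (ks : List Int) (v : Int) : (mkZero ks).getD v 0 = 0 := by
  induction ks with
  | nil => simp [mkZero, PySem.Dict.getD, PySem.Dict.get?, PySem.Dict.items]
  | cons k ks ih =>
      by_cases h : k = v <;>
        simp [mkZero, PySem.Dict.getD, PySem.Dict.get?, PySem.Dict.items, h] at ih ⊢ <;>
        simpa [mkZero, PySem.Dict.getD, PySem.Dict.get?, PySem.Dict.items, h] using ih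

theorem contains_mkZero (ks : List Int) (c : Int) :
    (mkZero ks).contains c = decide (c ∈ ks) := by
  rw [PySem.Dict.contains_eq_decide_mem_keys, keys_mkZero]

theorem insert_mkZero (ks : List Int) (c : Int) :
    (mkZero ks).insert c 0 = mkZero (PySem.Set.add ks c) := by
  by_cases h : c ∈ ks
  · have hc : (mkZero ks).contains c = true := by simp [contains_mkZero, h]
    have hadd : PySem.Set.add ks c = ks := by
      simp only [PySem.Set.add, PySem.Set.contains]
      simp [h]
    apply PySem.Dict.ext
    rw [PySem.Dict.items_insert_of_contains _ _ hc, hadd]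
    simp only [mkZero, List.map_map]
    apply List.map_congr_left
    intro k _
    by_cases hk : k = c <;> simp [hk]
  · have hc : (mkZero ks).contains c = false := by simp [contains_mkZero, h]
    have hadd : PySem.Set.add ks c = ks ++ [c] := by
      simp only [PySem.Set.add, PySem.Set.contains]
      simp [h]
    apply PySem.Dict.ext
    rw [PySem.Dict.items_insert_of_not_contains _ _ hc, hadd]
    simp [mkZero]

-- A's dict.fromkeys loop
theorem foldA (cs ks : List Int) :
    cs.foldl (fun d c => d.insert c 0) (mkZero ks) = mkZero (PySem.Set.update ks cs) := by
  induction cs generalizing ks with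
  | nil => simp [PySem.Set.update]
  | cons c cs ih =>
      rw [List.foldl_cons, insert_mkZero, ih]
      simp [PySem.Set.update]

-- B's guarded first-occurrence loop builds the same dict and the key order
theorem foldB (cs ks : List Int) :
    cs.foldl (fun (p : PySem.Dict Int Int × List Int) c =>
        if p.1.contains c then p else (p.1.insert c 0, p.2 ++ [c])) (mkZero ks, ks)
      = (mkZero (PySem.Set.update ks cs), PySem.Set.update ks cs) := by
  induction cs generalizing ks with
  | nil => simp [PySem.Set.update]
  | cons c cs ih =>
      rw [List.foldl_cons]
      by_cases h : c ∈ ks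
      · have hadd : PySem.Set.add ks c = ks := by
          simp only [PySem.Set.add, PySem.Set.contains]
          simp [h]
        simpa [contains_mkZero, h, PySem.Set.update, hadd] using ih ks
      · have hadd : PySem.Set.add ks c = ks ++ [c] := by
          simp only [PySem.Set.add, PySem.Set.contains]
          simp [h]
        simpa [contains_mkZero, h, insert_mkZero, hadd, PySem.Set.update] using ih (ks ++ [c])

-- the counting loop keeps the key list unchanged when every seen color is already a key
theorem keys_countFold (g : Int → Option Int) (l : List Int) (d : PySem.Dict Int Int)
    (h : ∀ n ∈ l, ∀ c, g n = some c → c ∈ d.keys) :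
    (l.foldl (fun d n => match g n with | some c => d.modify c 0 (· + 1) | none => d) d).keys
      = d.keys := by
  induction l generalizing d with
  | nil => simp
  | cons n l ih =>
      rw [List.foldl_cons]
      cases hg : g n with
      | none =>
          simp only [hg]
          exact ih d (fun n' hn' c hc => h n' (by simp [hn']) c hc)
      | some c =>
          simp only [hg]
          have hmem : c ∈ d.keys := h n (by simp) c hg
          have hct : d.contains c = true := (PySem.Dict.contains_iff_mem_keys d c).2 hmem
          have hkeys : (d.modify c 0 (· + 1)).keys = d.keys := by
            rw [PySem.Dict.keys_modify, PySem.Dict.keys_insert_of_contains _ _ hct]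
          rw [ih (d.modify c 0 (· + 1)) (fun n' hn' c' hc' => by
            rw [hkeys]; exact h n' (by simp [hn']) c' hc'), hkeys]

theorem getD_countFold_nonneg (g : Int → Option Int) (l : List Int) (d : PySem.Dict Int Int)
    (h : ∀ v, 0 ≤ d.getD v 0) (v : Int) :
    0 ≤ (l.foldl (fun d n => match g n with | some c => d.modify c 0 (· + 1) | none => d) d).getD v 0 := by
  induction l generalizing d with
  | nil => simpa using h v
  | cons n l ih =>
      rw [List.foldl_cons]
      cases hg : g n with
      | none => simpa only [hg] using ih d h
      | some c =>
          simp only [hg]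
          refine ih _ (fun w => ?_)
          rw [PySem.Dict.getD_modify]
          have := h w
          have := h c
          split <;> omega

theorem getD_countFold_le (g : Int → Option Int) (l : List Int) (d : PySem.Dict Int Int) (v : Int) :
    (l.foldl (fun d n => match g n with | some c => d.modify c 0 (· + 1) | none => d) d).getD v 0
      ≤ d.getD v 0 + l.length := by
  induction l generalizing d with
  | nil => simp
  | cons n l ih =>
      rw [List.foldl_cons]
      cases hg : g n with
      | none =>
          simp only [hg]
          have := ih d
          simp only [List.length_cons]
          omega
      | some c =>
          simp only [hg]
          have h1 := ih (d.modify c 0 (· + 1))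
          have h2 : (d.modify c 0 (· + 1)).getD v 0 ≤ d.getD v 0 + 1 := by
            rw [PySem.Dict.getD_modify]
            split <;> simp_all <;> omega
          simp only [List.length_cons]
          omega

theorem insertBy_append_left {α : Type} (before : α → α → Bool) (x : α) (P Q : List α)
    (h : ∀ y ∈ P, before x y = false) :
    PySem.List.insertBy before x (P ++ Q) = P ++ PySem.List.insertBy before x Q := by
  induction P with
  | nil => simp
  | cons y P ih =>
      have hy : before x y = false := h y (by simp)
      simp [PySem.List.insertBy, hy, ih (fun z hz => h z (by simp [hz]))]

theorem range_rev_split (m N : Nat) (h : m ≤ N) :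
    (List.range (N + 1)).reverse
      = (List.range' (m + 1) (N - m)).reverse ++ m :: (List.range m).reverse := by
  have e2 : List.range' m (N + 1 - m) = m :: List.range' (m + 1) (N - m) := by
    rw [show N + 1 - m = (N - m) + 1 from by omega, List.range'_succ]
  have e3 : List.range (N + 1) = List.range' 0 m ++ List.range' m (N + 1 - m) := by
    rw [List.range_eq_range']
    have e := @List.range'_append 0 m (N + 1 - m) 1
    rw [show 0 + 1 * m = m from by omega, show m + (N + 1 - m) = N + 1 from by omega] at e
    exact e.symm
  rw [e3, e2]
  rw [show List.range' 0 m = List.range m from List.range_eq_range'.symm]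
  simp [List.reverse_append]

-- Python's stable reverse sort by a bounded Nat-valued key IS bucket concatenation high→low
theorem sorted_rev_buckets {α : Type} (key : α → Int) (N : Nat) (xs : List α)
    (h : ∀ x ∈ xs, 0 ≤ key x ∧ key x ≤ (N : Int)) :
    PySem.List.sorted xs key true
      = ((List.range (N + 1)).reverse).flatMap
          (fun (k : Nat) => xs.filter (fun x => key x = (k : Int))) := by
  induction xs using List.reverseRecOn with
  | nil => simp [PySem.List.sorted]
  | append_singleton xs x ih =>
      have hx := h x (by simp)
      have hxs : ∀ y ∈ xs, 0 ≤ key y ∧ key y ≤ (N : Int) := fun y hy => h y (by simp [hy])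
      have hsort : PySem.List.sorted (xs ++ [x]) key true
          = PySem.List.insertBy (fun a b => decide (key b < key a)) x
              (PySem.List.sorted xs key true) := by
        rw [PySem.List.sorted_rev_eq_foldl_insertBy, PySem.List.sorted_rev_eq_foldl_insertBy,
          List.foldl_append]
        rfl
      set m : Nat := (key x).toNat with hmdef
      have hkx : key x = (m : Int) := by omega
      have hmN : m ≤ N := by
        have := hx.2
        omega
      rw [hsort, ih hxs, range_rev_split m N hmN]
      simp only [List.flatMap_append, List.flatMap_cons]
      -- the three segments of the bucket concatenation
      have hHi : ∀ k ∈ (List.range' (m + 1) (N - m)).reverse,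
          (xs ++ [x]).filter (fun y => key y = (k : Int))
            = xs.filter (fun y => key y = (k : Int)) := by
        intro k hk
        have hk' : m + 1 ≤ k := by
          rw [List.mem_reverse, List.mem_range'_1] at hk
          omega
        rw [List.filter_append]
        have : key x ≠ (k : Int) := by omega
        simp [this]
      have hLo : ∀ k ∈ (List.range m).reverse,
          (xs ++ [x]).filter (fun y => key y = (k : Int))
            = xs.filter (fun y => key y = (k : Int)) := by
        intro k hk
        have hk' : k < m := by
          rw [List.mem_reverse, List.mem_range] at hk
          omega
        rw [List.filter_append]
        have : key x ≠ (k : Int) := by omega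
        simp [this]
      have hMid : (xs ++ [x]).filter (fun y => key y = ((m : Nat) : Int))
          = xs.filter (fun y => key y = ((m : Nat) : Int)) ++ [x] := by
        rw [List.filter_append]
        simp [hkx]
      rw [List.flatMap_congr hHi, List.flatMap_congr hLo, hMid]
      -- insert x after the ≥-key prefix
      have hpre : ∀ y ∈ (List.range' (m + 1) (N - m)).reverse.flatMap
            (fun (k : Nat) => xs.filter (fun y => key y = (k : Int)))
          ++ xs.filter (fun y => key y = ((m : Nat) : Int)),
          (fun a b => decide (key b < key a)) x y = false := by
        intro y hy
        rw [List.mem_append] at hy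
        rcases hy with hy | hy
        · rw [List.mem_flatMap] at hy
          obtain ⟨k, hk, hyk⟩ := hy
          have hk' : m + 1 ≤ k := by
            rw [List.mem_reverse, List.mem_range'_1] at hk
            omega
          have := (List.mem_filter.1 hyk).2
          have hky : key y = (k : Int) := by simpa using this
          simp only [decide_eq_false_iff_not, not_lt]
          omega
        · have := (List.mem_filter.1 hy).2
          have hky : key y = ((m : Nat) : Int) := by simpa using this
          simp only [decide_eq_false_iff_not, not_lt]
          omega
      have hins := insertBy_append_left (fun a b => decide (key b < key a)) x
        ((List.range' (m + 1) (N - m)).reverse.flatMap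
            (fun (k : Nat) => xs.filter (fun y => key y = (k : Int)))
          ++ xs.filter (fun y => key y = ((m : Nat) : Int)))
        ((List.range m).reverse.flatMap (fun (k : Nat) => xs.filter (fun y => key y = (k : Int))))
        hpre
      rw [List.append_assoc] at hins
      rw [hins]
      -- the low segment starts (if at all) with a strictly smaller key
      cases hcase : (List.range m).reverse.flatMap
          (fun (k : Nat) => xs.filter (fun y => key y = (k : Int))) with
      | nil => simp [PySem.List.insertBy]
      | cons y ys =>
          have hy : y ∈ (List.range m).reverse.flatMap
              (fun (k : Nat) => xs.filter (fun y => key y = (k : Int))) := by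
            rw [hcase]; exact List.mem_cons_self
          rw [List.mem_flatMap] at hy
          obtain ⟨k, hk, hyk⟩ := hy
          have hk' : k < m := by
            rw [List.mem_reverse, List.mem_range] at hk
            omega
          have hky : key y = (k : Int) := by simpa using (List.mem_filter.1 hyk).2
          have hby : decide (key y < key x) = true := by
            simp only [decide_eq_true_eq]
            omega
          simp [PySem.List.insertBy, hby]

-- B's bucket-filling loop, characterised
theorem buckets_fold (key : Int → Int) (N : Nat) (g : Nat → List Int) (ks : List Int)
    (h : ∀ c ∈ ks, 0 ≤ key c ∧ key c ≤ (N : Int)) :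
    ks.foldl (fun bs c =>
        PySem.List.pySetD bs (key c) (PySem.List.pyGetD bs (key c) [] ++ [c]))
      ((List.range (N + 1)).map g)
    = (List.range (N + 1)).map (fun (k : Nat) => g k ++ ks.filter (fun c => key c = (k : Int))) := by
  induction ks generalizing g with
  | nil => simp
  | cons c ks ih =>
      have hc := h c (by simp)
      set m : Nat := (key c).toNat with hmdef
      have hkc : key c = (m : Int) := by omega
      have hmlt : m < N + 1 := by omega
      rw [List.foldl_cons]
      have hget : PySem.List.pyGetD ((List.range (N + 1)).map g) (key c) [] = g m := by
        rw [hkc, PySem.List.pyGetD_natCast]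
        simp [List.getD, hmlt]
      have hset : PySem.List.pySetD ((List.range (N + 1)).map g) (key c) (g m ++ [c])
          = (List.range (N + 1)).map (fun k => if k = m then g m ++ [c] else g k) := by
        rw [hkc, PySem.List.pySetD_natCast]
        apply List.ext_getElem
        · simp
        · intro i hi hi'
          rw [List.getElem_set]
          simp only [List.getElem_map, List.getElem_range]
          split
          · next hmi => simp [← hmi]
          · next hmi =>
              have : i ≠ m := fun e => hmi e.symm
              simp [this]
      rw [hget, hset, ih (fun k => if k = m then g m ++ [c] else g k)
        (fun c' hc' => h c' (by simp [hc']))]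
      apply List.map_congr_left
      intro k _
      by_cases hk : k = m
      · have hkeq : key c = (k : Int) := by rw [hk]; exact hkc
        simp [hk, hkeq, List.filter_cons]
      · have hkne : ¬ (key c = (k : Int)) := by omega
        simp [hk, hkne, List.filter_cons]

-- ===== VERDICT (by name: the statement is the Claim_ definition above) =====
theorem sorted_colors_spec : Claim_equal_sorted_colors := by
  intro graph graph_coloring colors node _hdom hpre
  obtain ⟨_h1, h2⟩ := hpre
  unfold Spec_sorted_colors
  simp only [sorted_colors, sorted_colors_alt, PySem.List.len_eq]
  have hempty : (PySem.Dict.empty : PySem.Dict Int Int) = mkZero [] := rfl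
  rw [hempty, foldA, foldB]
  have hupd : PySem.Set.update ([] : List Int) colors = PySem.Set.ofList colors := rfl
  rw [hupd]
  set D := PySem.Set.ofList colors with hD
  set neighbors := PySem.Dict.getD (PySem.Dict.mk graph) node [] with hnb
  set N := neighbors.length with hN
  set G := fun (n : Int) => PySem.Dict.getD (PySem.Dict.mk graph_coloring) n none with hG
  set nc := neighbors.foldl
    (fun d neighbor => match G neighbor with | some c => d.modify c 0 (· + 1) | none => d)
    (mkZero D) with hnc
  -- the counting dict: keys and value bounds
  have hkeys : nc.keys = D := by
    rw [hnc, keys_countFold G neighbors (mkZero D), keys_mkZero]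
    intro n hn c hc
    rw [keys_mkZero]
    have := (h2 n hn).2
    rw [hG] at hc
    simp only [hc, Option.all_some] at this
    have : c ∈ colors := by simpa [List.contains_iff_mem] using this
    simpa [hD] using (PySem.Set.mem_ofList colors c).2 this
  have hbounds : ∀ v, 0 ≤ nc.getD v 0 ∧ nc.getD v 0 ≤ (N : Int) := by
    intro v
    constructor
    · rw [hnc]
      exact getD_countFold_nonneg G neighbors (mkZero D) (fun w => by rw [getD_mkZero]) v
    · have := getD_countFold_le G neighbors (mkZero D) v
      rw [getD_mkZero] at this
      rw [hnc, hN]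
      omega
  -- A: the stable reverse sort is bucket concatenation
  rw [hkeys, sorted_rev_buckets (fun c => nc.getD c 0) N D
    (fun c _ => hbounds c)]
  -- B: the initial bucket list is (range (N+1)).map (fun _ => [])
  have hb0 : (PySem.List.pyRange 0 ((N : Int) + 1) 1).map (fun _ => ([] : List Int))
      = (List.range (N + 1)).map (fun _ => ([] : List Int)) := by
    rw [show ((N : Int) + 1) = ((N + 1 : Nat) : Int) from by push_cast; ring]
    rw [PySem.List.pyRange_zero_nat]
    simp only [List.map_map]
    rfl
  rw [hb0, buckets_fold (fun c => nc.getD c 0) N (fun _ => []) D (fun c _ => hbounds c)]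
  -- B: extending over the reversed buckets is flatMap over the reversed range
  simp only [List.nil_append]
  rw [PySem.List.foldl_append_eq_flatMap (fun b => b), ← List.map_reverse, List.flatMap_map]
  simp
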